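-- pv_equiv track=rewrite | github.com/UChicagoSUPERgroup/keywords_generation | key/tree_implement/remove_duplicate.py | remove_duplicate
-- ===== SOURCE A (Python) =====
-- def remove_duplicate(ls_ls):
--     remove_dic = {}
--
--     for ls in ls_ls:
--         for word in ls:
--
--             if word in remove_dic.keys():
--                 remove_dic[word] += 1
--             else:
--                 remove_dic[word] = 1
--     rm_ls = [word for word in remove_dic.keys() if remove_dic[word] > 1]
--     new_ls = []
--     for ls in ls_ls:
--         ls = [word for word in ls if word not in rm_ls]
--         new_ls.append(ls)
--
--     return new_ls
-- ===== SOURCE B (Python) =====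
-- def remove_duplicate(ls_ls):
--     flat = sorted(w for ls in ls_ls for w in ls)
--     unique = set()
--     rest = flat
--     while rest:
--         x = rest[0]
--         i = 1
--         while i < len(rest) and rest[i] == x:
--             i += 1
--         if i == 1:
--             unique.add(x)
--         rest = rest[i:]
--     return [[w for w in ls if w in unique] for ls in ls_ls]
-- ===== Notes on version B (the rewrite author's own statement) =====
-- stated objective: alternative
-- what changed: Replaces the frequency dictionary and the count>1 comprehension with sort-then-run-length-scan: the flattened word list is sorted, maximal runs of equal words are scanned, words with a run of length 1 form a unique set, and each sublist keeps exactly the words in that set (positive filter) instead of dropping ones in a duplicate list.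
import Mathlib
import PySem

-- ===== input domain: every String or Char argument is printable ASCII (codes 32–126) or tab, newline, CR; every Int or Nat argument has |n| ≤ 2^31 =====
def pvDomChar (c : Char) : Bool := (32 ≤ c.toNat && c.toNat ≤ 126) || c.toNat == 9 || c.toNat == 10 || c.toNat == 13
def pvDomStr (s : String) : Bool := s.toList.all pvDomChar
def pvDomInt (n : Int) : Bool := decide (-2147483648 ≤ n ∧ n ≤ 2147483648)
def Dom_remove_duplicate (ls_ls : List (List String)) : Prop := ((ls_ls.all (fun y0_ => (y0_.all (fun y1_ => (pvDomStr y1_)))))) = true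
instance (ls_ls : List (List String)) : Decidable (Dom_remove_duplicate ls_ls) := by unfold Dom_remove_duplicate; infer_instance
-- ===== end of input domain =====

-- B replaces A's frequency dictionary and count>1 comprehension with sort-then-run-length-scan over the flattened words, keeping words in the unique set (alternative algorithm, similar cost).

-- ===== PORT A =====
def remove_duplicate (ls_ls : List (List String)) : List (List String) :=
  let remove_dic : PySem.Dict String Int :=
    ls_ls.foldl (fun d ls =>
      ls.foldl (fun d word =>
        if d.contains word then d.modify word 0 (· + 1) else d.insert word 1) d)
      PySem.Dict.empty
  let rm_ls : List String :=
    remove_dic.keys.filter (fun word => decide ((1 : Int) < remove_dic.getD word 0))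
  ls_ls.foldl (fun new_ls ls =>
    new_ls ++ [ls.filter (fun word => !(rm_ls.contains word))]) []

-- ===== PORT B =====
-- B's outer while loop over the sorted residue: take the maximal run of the head,
-- add the head to `unique` when the run has length 1, continue on the residue.
def runUniquesAux : List String → PySem.Set String → PySem.Set String
  | [], u => u
  | x :: xs, u =>
    runUniquesAux (xs.dropWhile (fun w => w == x))
      (if xs.takeWhile (fun w => w == x) = [] then PySem.Set.add u x else u)
  termination_by l _ => l.length
  decreasing_by
    simpa using Nat.lt_succ_of_le (List.length_dropWhile_le _ _)

def remove_duplicate_alt (ls_ls : List (List String)) : List (List String) :=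
  let flat : List String := PySem.List.sorted (ls_ls.flatMap (fun ls => ls)) (fun w => w) false
  let unique : PySem.Set String := runUniquesAux flat PySem.Set.empty
  ls_ls.map (fun ls => ls.filter (fun word => PySem.Set.contains unique word))

-- ===== PRECONDITION & SPEC =====
def Spec_remove_duplicate (ls_ls : List (List String)) (out : List (List String)) : Prop := out = remove_duplicate_alt ls_ls
instance (ls_ls : List (List String)) (out : List (List String)) : Decidable (Spec_remove_duplicate ls_ls out) := by unfold Spec_remove_duplicate; infer_instance

-- ===== CLAIM (what is proved, stated in full; the proofs are below) =====
def Claim_equal_remove_duplicate : Prop := ∀ (ls_ls : List (List String)), Dom_remove_duplicate ls_ls → Spec_remove_duplicate ls_ls (remove_duplicate ls_ls)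

-- ===== LEMMAS AND PROOFS =====

-- A's counting loop: getD of the fold is the initial value plus the count in the traversed list.
theorem getD_foldA (l : List String) (d : PySem.Dict String Int) (v : String) :
    (l.foldl (fun d word =>
        if d.contains word then d.modify word 0 (· + 1) else d.insert word 1) d).getD v 0
      = d.getD v 0 + l.count v := by
  induction l generalizing d with
  | nil => simp
  | cons w l ih =>
    simp only [List.foldl_cons, ih, List.count_cons]
    by_cases hc : d.contains w = true
    · rw [if_pos hc, PySem.Dict.getD_modify]
      by_cases hv : v = w
      · subst hv; simp; ring
      · simp [hv, Ne.symm hv]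
    · rw [if_neg hc, PySem.Dict.getD_insert]
      by_cases hv : v = w
      · subst hv
        rw [PySem.Dict.getD_of_not_contains d 0 (by simpa using hc)]
        simp
        omega
      · simp [hv, Ne.symm hv]

-- A's counting loop: key membership is membership in the traversed list.
theorem contains_foldA (l : List String) (d : PySem.Dict String Int) (v : String) :
    (l.foldl (fun d word =>
        if d.contains word then d.modify word 0 (· + 1) else d.insert word 1) d).contains v
      = (d.contains v || l.contains v) := by
  induction l generalizing d with
  | nil => simp
  | cons w l ih =>
    simp only [List.foldl_cons, ih, List.contains_cons]
    by_cases hc : d.contains w = true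
    · rw [if_pos hc, PySem.Dict.contains_modify]
      by_cases hv : v = w <;> simp [hv, hc, Bool.or_comm, Bool.or_left_comm, Bool.or_assoc]
    · rw [if_neg hc, PySem.Dict.contains_insert]
      by_cases hv : v = w <;> simp [hv, Bool.or_comm, Bool.or_left_comm, Bool.or_assoc]

-- A's rm_ls: a word is removed iff it occurs at least twice overall.
theorem rm_foldA (L : List String) (v : String) :
    ((L.foldl (fun d word =>
        if d.contains word then d.modify word 0 (· + 1) else d.insert word 1)
        (PySem.Dict.empty : PySem.Dict String Int)).keys.filter
      (fun word => decide ((1 : Int) < (L.foldl (fun d word =>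
        if d.contains word then d.modify word 0 (· + 1) else d.insert word 1)
        (PySem.Dict.empty : PySem.Dict String Int)).getD word 0))).contains v = true
      ↔ 2 ≤ L.count v := by
  rw [List.contains_iff_mem, List.mem_filter]
  have hk : v ∈ (L.foldl (fun d word =>
      if d.contains word then d.modify word 0 (· + 1) else d.insert word 1)
      (PySem.Dict.empty : PySem.Dict String Int)).keys ↔ v ∈ L := by
    rw [← PySem.Dict.contains_iff_mem_keys, contains_foldA]
    simp
  rw [hk, getD_foldA]
  simp only [PySem.Dict.getD_empty, decide_eq_true_eq]
  constructor
  · rintro ⟨_, h2⟩; omega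
  · intro h
    exact ⟨List.count_pos_iff.mp (by omega), by omega⟩

-- head of a dropWhile fails the predicate
theorem dropWhile_head_false {a : Type} (p : a → Bool) (l : List a) (y : a) (t : List a)
    (hr : l.dropWhile p = y :: t) : p y = false := by
  induction l with
  | nil => simp at hr
  | cons z zs ih =>
    by_cases hp : p z = true
    · rw [List.dropWhile_cons_of_pos hp] at hr
      exact ih hr
    · rw [List.dropWhile_cons_of_neg hp] at hr
      injection hr with h1 _
      subst h1
      simpa using hp

-- On a sorted list, the head does not reappear after its maximal run.
theorem head_not_mem_dropWhile (x : String) (xs : List String)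
    (h : (x :: xs).Pairwise (· ≤ ·)) : x ∉ xs.dropWhile (fun w => w == x) := by
  intro hmem
  have hsub : List.Sublist (xs.dropWhile (fun w => w == x)) xs := List.dropWhile_sublist _
  cases hr : xs.dropWhile (fun w => w == x) with
  | nil => simp [hr] at hmem
  | cons y t =>
    have hy : (fun w => w == x) y = false := dropWhile_head_false (fun w => w == x) xs y t hr
    have hyx : y ≠ x := by simpa using hy
    have hle : ∀ z ∈ xs, x ≤ z := (List.pairwise_cons.mp h).1
    have hxy : x < y := lt_of_le_of_ne (hle y (hsub.subset (hr ▸ List.mem_cons_self))) (Ne.symm hyx)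
    have hpt : (y :: t).Pairwise (· ≤ ·) := hr ▸ (List.pairwise_cons.mp h).2.sublist hsub
    rw [hr] at hmem
    rcases List.mem_cons.mp hmem with h1 | h1
    · exact hyx h1.symm
    · exact absurd ((List.pairwise_cons.mp hpt).1 x h1) (not_le_of_gt hxy)

-- B's run scan on a sorted list: membership in the accumulated set is
-- "already there, or counted exactly once in the residue".
theorem mem_runUniquesAux (l : List String) (u : PySem.Set String) (v : String)
    (hs : l.Pairwise (· ≤ ·)) :
    v ∈ runUniquesAux l u ↔ v ∈ u ∨ l.count v = 1 := by
  induction hn : l.length using Nat.strong_induction_on generalizing l u with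
  | _ n ih =>
    cases l with
    | nil => simp [runUniquesAux]
    | cons x xs =>
      have hsplit : xs.takeWhile (fun w => w == x) ++ xs.dropWhile (fun w => w == x) = xs :=
        List.takeWhile_append_dropWhile
      have hrest_sorted : (xs.dropWhile (fun w => w == x)).Pairwise (· ≤ ·) :=
        (List.pairwise_cons.mp hs).2.sublist (List.dropWhile_sublist _)
      have hxrest : x ∉ xs.dropWhile (fun w => w == x) := head_not_mem_dropWhile x xs hs
      have hlen : (xs.dropWhile (fun w => w == x)).length < n := by
        subst hn
        simpa using Nat.lt_succ_of_le (List.length_dropWhile_le _ _)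
      have hrun : ∀ z ∈ xs.takeWhile (fun w => w == x), z = x := by
        intro z hz
        simpa using List.mem_takeWhile_imp hz
      have hcount : ∀ w : String,
          (x :: xs).count w
            = (if w = x then 1 + (xs.takeWhile (fun w => w == x)).length else 0)
              + (xs.dropWhile (fun w => w == x)).count w := by
        intro w
        rw [List.count_cons, ← hsplit, List.count_append]
        by_cases hw : w = x
        · subst hw
          have : (xs.takeWhile (fun z => z == w)).count w
              = (xs.takeWhile (fun z => z == w)).length := by
            apply List.count_eq_length.mpr
            intro z hz
            exact ((hrun z hz) ▸ rfl : w = z)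
          simp [this]
          omega
        · have : (xs.takeWhile (fun z => z == x)).count w = 0 := by
            apply List.count_eq_zero.mpr
            intro hmem
            exact hw (hrun w hmem)
          simp [this, hw, Ne.symm hw]
      rw [runUniquesAux]
      rw [ih _ hlen _ _ hrest_sorted rfl]
      have hcrest0 : (xs.dropWhile (fun w => w == x)).count x = 0 :=
        List.count_eq_zero.mpr hxrest
      by_cases hrunnil : xs.takeWhile (fun w => w == x) = []
      · rw [if_pos hrunnil, PySem.Set.mem_add]
        constructor
        · rintro (⟨h1 | h1⟩ | h1)
          · exact Or.inl h1
          · subst h1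
            right
            rw [hcount v, if_pos rfl, hrunnil, hcrest0]
            simp
          · right
            rw [hcount v]
            by_cases hv : v = x
            · subst hv; rw [if_pos rfl, hrunnil, hcrest0]; simp
            · rw [if_neg hv]; omega
        · rintro (h1 | h1)
          · exact Or.inl (Or.inl h1)
          · by_cases hv : v = x
            · exact Or.inl (Or.inr hv)
            · right
              rw [hcount v, if_neg hv] at h1
              omega
      · rw [if_neg hrunnil]
        have hrl : 1 ≤ (xs.takeWhile (fun w => w == x)).length :=
          List.length_pos_of_ne_nil hrunnil
        constructor
        · rintro (h1 | h1)
          · exact Or.inl h1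
          · right
            rw [hcount v]
            by_cases hv : v = x
            · subst hv; rw [hcrest0] at h1; omega
            · rw [if_neg hv]; omega
        · rintro (h1 | h1)
          · exact Or.inl h1
          · by_cases hv : v = x
            · subst hv
              rw [hcount v, if_pos rfl, hcrest0] at h1
              omega
            · right
              rw [hcount v, if_neg hv] at h1
              omega

-- B's unique set over the sorted flattened words: words counted exactly once overall.
theorem contains_uniqueB (L : List String) (v : String) :
    PySem.Set.contains
        (runUniquesAux (PySem.List.sorted L (fun w => w) false) PySem.Set.empty) v = true
      ↔ L.count v = 1 := by
  rw [PySem.Set.contains_iff,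
    mem_runUniquesAux _ _ _ (PySem.List.sorted_pairwise L (fun w => w))]
  rw [(PySem.List.sorted_perm L (fun w => w) false).count_eq]
  simp [PySem.Set.empty]

-- ===== VERDICT (by name: the statement is the Claim_ definition above) =====
theorem remove_duplicate_spec : Claim_equal_remove_duplicate := by
  intro ls_ls _
  unfold Spec_remove_duplicate remove_duplicate remove_duplicate_alt
  rw [← List.foldl_flatten, PySem.List.foldl_append_singleton_eq_map]
  have hflat : ls_ls.flatMap (fun ls => ls) = ls_ls.flatten := by
    simp
  rw [hflat]
  apply List.map_congr_left
  intro ls hls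
  apply List.filter_congr
  intro w hw
  have hmem : w ∈ ls_ls.flatten := List.mem_flatten.mpr ⟨ls, hls, hw⟩
  have h1 : 1 ≤ ls_ls.flatten.count w := List.one_le_count_iff.mpr hmem
  rw [Bool.eq_iff_iff]
  rw [contains_uniqueB]
  rw [Bool.not_eq_eq_eq_not, Bool.not_true, ← Bool.not_eq_true, rm_foldA]
  omega
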